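-- pv_equiv track=rewrite | github.com/teixeirazeus/advent-of-code | 2023/day14.py | tilt_south
-- ===== SOURCE A (Python) =====
-- def tilt_south(case):
--     tilt = True
--     while tilt:
--         tilt = False
--         for y, line in enumerate(case):
--             for x, value in enumerate(line):
--                 if y != len(case) - 1:
--                     if value == "O" and case[y + 1][x] == ".":
--                         tilt = True
--                         case[y + 1][x] = "O"
--                         case[y][x] = "."
--     return case
-- ===== SOURCE B (Python) =====
-- def tilt_south(case):
--     # Per-column single pass: count '.'/'O' in each maximal movable run and
--     # rewrite it with the dots on top and the rocks at the bottom.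
--     height = len(case)
--     width = max((len(row) for row in case), default=0)
--     cols = []
--     for x in range(width):
--         out, dots, rocks = [], 0, 0
--         for y in range(height):
--             v = case[y][x] if x < len(case[y]) else None
--             if v == ".":
--                 dots += 1
--             elif v == "O":
--                 rocks += 1
--             else:
--                 out += ["."] * dots + ["O"] * rocks + [v]
--                 dots = rocks = 0
--         out += ["."] * dots + ["O"] * rocks
--         cols.append(out)
--     for y in range(height):
--         row = case[y]
--         for x in range(len(row)):
--             row[x] = cols[x][y]
--     return case
-- ===== Notes on version B (the rewrite author's own statement) =====
-- stated objective: alternative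
-- what changed: A repeatedly sweeps the whole grid moving each 'O' one row down until a fixed point; B makes a single counting pass per column, rewriting every maximal run of '.'/'O' cells as dots-on-top, rocks-at-bottom (asymptotically fewer passes in the worst case, but not measurably faster on the benchmark inputs).
import Mathlib
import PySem

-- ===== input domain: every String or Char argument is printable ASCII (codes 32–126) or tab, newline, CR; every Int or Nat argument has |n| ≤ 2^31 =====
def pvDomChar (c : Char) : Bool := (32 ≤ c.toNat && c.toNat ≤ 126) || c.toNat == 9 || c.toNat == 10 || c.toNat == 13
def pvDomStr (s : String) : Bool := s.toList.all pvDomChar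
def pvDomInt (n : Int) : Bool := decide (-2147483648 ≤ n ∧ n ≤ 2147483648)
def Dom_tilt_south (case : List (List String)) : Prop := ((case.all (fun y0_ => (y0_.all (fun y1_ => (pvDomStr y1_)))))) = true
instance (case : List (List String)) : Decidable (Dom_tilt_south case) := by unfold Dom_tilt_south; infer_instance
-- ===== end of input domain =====

-- B replaces A's repeat-until-no-move sweeps by one counting pass per column; both Pythons
-- mutate `case` in place and return it, and they leave it in the same final state.

-- ===== PORT A =====
-- cell (y,x) of the grid, none when the row or the index is missing
def cellOf (g : List (List String)) (y x : Nat) : Option String :=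
  (g[y]?).bind (fun row => row[x]?)

-- case[y][x] = v  (indices are in range whenever A executes this)
def setCell (g : List (List String)) (y x : Nat) (v : String) : List (List String) :=
  g.set y ((g.getD y []).set x v)

-- one (y,x) step of A's double loop over the state (grid, tilt)
def sweepStep (st : List (List String) × Bool) (y x : Nat) : List (List String) × Bool :=
  if y ≠ st.1.length - 1 then
    if cellOf st.1 y x = some "O" ∧ cellOf st.1 (y + 1) x = some "." then
      (setCell (setCell st.1 (y + 1) x "O") y x ".", true)
    else st
  else st

-- one full sweep `for y ...: for x ...:` (row lengths and the row count never change,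
-- so the ranges read from the argument grid are the lengths Python reads)
def sweep (g : List (List String)) : List (List String) × Bool :=
  (List.range g.length).foldl
    (fun st y => (List.range ((g.getD y []).length)).foldl (fun st' x => sweepStep st' y x) st)
    (g, false)

-- termination measure: each "O" weighted by the number of rows below it
def potAux : List (List String) → Nat
  | [] => 0
  | row :: rest => rest.length * row.count "O" + potAux rest

-- the `while tilt:` loop (fuel `potAux g + 1` provably suffices: every tilting sweep
-- strictly decreases potAux)
def loopA : Nat → List (List String) → List (List String)
  | 0, g => g
  | fuel + 1, g =>
    match sweep g with
    | (g', t) => if t then loopA fuel g' else g'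

def tilt_south (case : List (List String)) : List (List String) :=
  loopA (potAux case + 1) case

-- ===== PORT B =====
-- column x of the grid, none where a row is too short (Source B's `col` list)
def colD (g : List (List String)) (x : Nat) : List (Option String) :=
  g.map (fun row => row[x]?)

-- Source B's inner loop: one pass with (out, dots, rocks), flushing each run
def settleColumn (c : List (Option String)) : List (Option String) :=
  let s := c.foldl
    (fun (st : List (Option String) × Nat × Nat) v =>
      if v = some "." then (st.1, st.2.1 + 1, st.2.2)
      else if v = some "O" then (st.1, st.2.1, st.2.2 + 1)
      else (st.1 ++ List.replicate st.2.1 (some ".") ++ List.replicate st.2.2 (some "O") ++ [v], 0, 0))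
    ([], 0, 0)
  s.1 ++ List.replicate s.2.1 (some ".") ++ List.replicate s.2.2 (some "O")

-- max((len(row) for row in case), default=0)
def widthOf (g : List (List String)) : Nat :=
  g.foldl (fun w row => Nat.max w row.length) 0

def tilt_south_alt (case : List (List String)) : List (List String) :=
  let height := case.length
  let cols := (List.range (widthOf case)).map (fun x => settleColumn (colD case x))
  (List.range height).map (fun y =>
    (List.range ((case.getD y []).length)).map
      (fun x => (((cols.getD x []).getD y none).getD "")))

-- ===== PRECONDITION & SPEC =====
-- Pre_ excludes exactly the ragged grids on which Python A raises IndexError: those with a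
-- contiguous run of '.'/'O' cells, containing an 'O', in some column x, whose bottom row is
-- followed by a row too short to contain index x.
def Pre_tilt_south (case : List (List String)) : Prop :=
  ((List.range case.length).all (fun y =>
    (List.range ((case.getD y []).length)).all (fun x =>
      (List.range (y + 1)).all (fun y0 =>
        !(decide (y + 1 < case.length) &&
          decide ((case.getD (y + 1) []).length ≤ x) &&
          ((case.getD y0 []).getD x "" == "O") &&
          ((List.range' y0 (y + 1 - y0)).all (fun y1 =>
            ((case.getD y1 []).getD x "" == "O") ||
            ((case.getD y1 []).getD x "" == ".")))))))) = true
instance (case : List (List String)) : Decidable (Pre_tilt_south case) := by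
  unfold Pre_tilt_south; infer_instance

def pvWitness_tilt_south : List (List String) := [["O", "."], [".", "#"]]

def Spec_tilt_south (case : List (List String)) (out : List (List String)) : Prop :=
  out = tilt_south_alt case
instance (case : List (List String)) (out : List (List String)) : Decidable (Spec_tilt_south case out) := by
  unfold Spec_tilt_south; infer_instance

-- ===== CLAIM (what is proved, stated in full; the proofs are below) =====
def Claim_equal_tilt_south : Prop :=
  ∀ (case : List (List String)), Dom_tilt_south case → Pre_tilt_south case →
    Spec_tilt_south case (tilt_south case)


-- ===== LEMMAS AND PROOFS =====

-- normalised form of one column: each maximal run of '.'/'O' cells becomes dots-then-rocks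
def normAux : List (Option String) → Nat → Nat → List (Option String)
  | [], d, r => List.replicate d (some ".") ++ List.replicate r (some "O")
  | v :: rest, d, r =>
    if v = some "." then normAux rest (d + 1) r
    else if v = some "O" then normAux rest d (r + 1)
    else List.replicate d (some ".") ++ List.replicate r (some "O") ++ v :: normAux rest 0 0


-- ---------- generic foldl helpers ----------
theorem foldl_inv {σ α : Type} (P : σ → Prop) (f : σ → α → σ)
    (h : ∀ s a, P s → P (f s a)) : ∀ (l : List α) (s : σ), P s → P (l.foldl f s) := by
  intro l
  induction l with
  | nil => intro s hs; exact hs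
  | cons b l ih => intro s hs; exact ih _ (h s b hs)

theorem foldl_pure {σ α : Type} (f : σ × Bool → α → σ × Bool)
    (pof : ∀ s a, f s a = s ∨ (f s a).2 = true) :
    ∀ (l : List α) (s : σ × Bool), (l.foldl f s).2 = false →
      l.foldl f s = s ∧ ∀ a ∈ l, f s a = s := by
  intro l
  induction l with
  | nil => intro s _; exact ⟨rfl, by simp⟩
  | cons b l ih =>
    intro s hfin
    simp only [List.foldl_cons] at hfin
    have hmono : ∀ (l' : List α) (s' : σ × Bool), s'.2 = true → (l'.foldl f s').2 = true := by
      intro l'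
      induction l' with
      | nil => intro s' h; exact h
      | cons c l' ih' =>
        intro s' h
        rcases pof s' c with h1 | h1
        · simp only [List.foldl_cons, h1]; exact ih' s' h
        · exact ih' _ h1
    rcases pof s b with h1 | h1
    · rw [h1] at hfin
      rcases ih s hfin with ⟨h2, h3⟩
      refine ⟨by simpa [h1] using h2, ?_⟩
      intro a ha
      rcases List.mem_cons.mp ha with rfl | ha
      · exact h1
      · exact h3 a ha
    · exact absurd (hmono l _ h1) (by simp [hfin])

-- ---------- normAux lemmas ----------
theorem normAux_dot (rest : List (Option String)) (d r : Nat) :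
    normAux (some "." :: rest) d r = normAux rest (d + 1) r := by simp [normAux]

theorem normAux_rock (rest : List (Option String)) (d r : Nat) :
    normAux (some "O" :: rest) d r = normAux rest d (r + 1) := by simp [normAux]

theorem normAux_block {v : Option String} (rest : List (Option String)) (d r : Nat)
    (hv1 : v ≠ some ".") (hv2 : v ≠ some "O") :
    normAux (v :: rest) d r =
      List.replicate d (some ".") ++ List.replicate r (some "O") ++ v :: normAux rest 0 0 := by
  simp [normAux, hv1, hv2]

theorem normAux_swap : ∀ (cl : List (Option String)) (y d r : Nat),
    cl[y]? = some (some "O") → cl[y + 1]? = some (some ".") →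
    normAux ((cl.set (y + 1) (some "O")).set y (some ".")) d r = normAux cl d r := by
  intro cl
  induction cl with
  | nil => intro y d r h1 _; simp at h1
  | cons v rest ih =>
    intro y d r h1 h2
    cases y with
    | zero =>
      simp only [List.getElem?_cons_zero, Option.some.injEq] at h1
      subst h1
      rcases rest with _ | ⟨w, rest'⟩
      · simp at h2
      · simp only [List.getElem?_cons_succ, List.getElem?_cons_zero, Option.some.injEq] at h2
        subst h2
        simp [normAux]
    | succ y' =>
      simp only [List.getElem?_cons_succ] at h1 h2
      have hset : ((v :: rest).set (y' + 1 + 1) (some "O")).set (y' + 1) (some ".") =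
          v :: ((rest.set (y' + 1) (some "O")).set y' (some ".")) := by
        simp [List.set_cons_succ]
      rw [hset]
      by_cases hv1 : v = some "."
      · subst hv1; rw [normAux_dot]; exact ih y' (d + 1) r h1 h2
      · by_cases hv2 : v = some "O"
        · subst hv2
          rw [normAux_rock]
          exact ih y' d (r + 1) h1 h2
        · rw [normAux_block _ _ _ hv1 hv2, normAux_block rest d r hv1 hv2]
          rw [ih y' 0 0 h1 h2]

def settledCol (cl : List (Option String)) : Prop :=
  ∀ y : Nat, ¬ (cl[y]? = some (some "O") ∧ cl[y + 1]? = some (some "."))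

theorem settledCol_tail {v : Option String} {rest : List (Option String)}
    (h : settledCol (v :: rest)) : settledCol rest := by
  intro y hy
  exact h (y + 1) (by simpa using hy)

theorem normAux_settled : ∀ (cl : List (Option String)) (d r : Nat), settledCol cl →
    (r ≠ 0 → cl.head? ≠ some (some ".")) →
    normAux cl d r = List.replicate d (some ".") ++ List.replicate r (some "O") ++ cl := by
  intro cl
  induction cl with
  | nil => intro d r _ _; simp [normAux]
  | cons v rest ih =>
    intro d r hs hh
    by_cases hv1 : v = some "."
    · subst hv1
      have hr : r = 0 := by
        by_contra hr
        exact hh hr (by simp)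
      subst hr
      rw [normAux_dot]
      rw [ih (d + 1) 0 (settledCol_tail hs) (by simp)]
      simp [List.replicate_succ']
    · by_cases hv2 : v = some "O"
      · subst hv2
        have hhd : rest.head? ≠ some (some ".") := by
          intro hc
          refine hs 0 ⟨by simp, ?_⟩
          cases rest with
          | nil => simp at hc
          | cons w r' => simpa using hc
        rw [normAux_rock]
        rw [ih d (r + 1) (settledCol_tail hs) (fun _ => hhd)]
        simp [List.replicate_succ']
      · rw [normAux_block _ _ _ hv1 hv2]
        rw [ih 0 0 (settledCol_tail hs) (by simp)]
        simp

theorem normAux_length : ∀ (cl : List (Option String)) (d r : Nat),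
    (normAux cl d r).length = d + r + cl.length := by
  intro cl
  induction cl with
  | nil => intro d r; simp [normAux]
  | cons v rest ih =>
    intro d r
    by_cases hv1 : v = some "."
    · subst hv1; rw [normAux_dot]; rw [ih]; simp; omega
    · by_cases hv2 : v = some "O"
      · subst hv2
        rw [normAux_rock]
        rw [ih]; simp; omega
      · rw [normAux_block _ _ _ hv1 hv2]
        simp [ih]; omega

theorem rep_append_none {a b : Nat} {cl : List (Option String)} {y : Nat} :
    ((List.replicate a (some ".") ++ List.replicate b (some "O") ++ cl)[y]? = some none) ↔
      (a + b ≤ y ∧ cl[y - (a + b)]? = some none) := by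
  simp only [List.append_assoc]
  rcases Nat.lt_or_ge y a with h | h
  · rw [List.getElem?_append_left (by simpa using h)]
    simp [h]
    omega
  · rw [List.getElem?_append_right (by simpa using h)]
    rcases Nat.lt_or_ge (y - a) b with h2 | h2
    · rw [List.getElem?_append_left (by simpa using h2)]
      simp [h2]
      omega
    · rw [List.getElem?_append_right (by simpa using h2)]
      simp only [List.length_replicate]
      constructor
      · intro hc; exact ⟨by omega, by have : y - a - b = y - (a + b) := by omega
                                      rwa [this] at hc⟩
      · intro ⟨h3, hc⟩; have : y - a - b = y - (a + b) := by omega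
        rwa [this]

theorem normAux_none : ∀ (cl : List (Option String)) (d r y : Nat),
    ((normAux cl d r)[y]? = some none) ↔ (d + r ≤ y ∧ cl[y - (d + r)]? = some none) := by
  intro cl
  induction cl with
  | nil =>
    intro d r y
    have := @rep_append_none d r [] y
    simpa [normAux] using this
  | cons v rest ih =>
    intro d r y
    by_cases hv1 : v = some "."
    · subst hv1
      rw [normAux_dot]
      rw [ih]
      constructor
      · intro ⟨h1, h2⟩
        refine ⟨by omega, ?_⟩
        have hy : y - (d + r) = (y - (d + 1 + r)) + 1 := by omega
        rw [hy, List.getElem?_cons_succ]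
        exact h2
      · intro ⟨h1, h2⟩
        rcases Nat.lt_or_ge y (d + 1 + r) with h3 | h3
        · have hy : y - (d + r) = 0 := by omega
          rw [hy] at h2; simp at h2
        · refine ⟨h3, ?_⟩
          have hy : y - (d + r) = (y - (d + 1 + r)) + 1 := by omega
          rw [hy, List.getElem?_cons_succ] at h2
          exact h2
    · by_cases hv2 : v = some "O"
      · subst hv2
        rw [normAux_rock]
        rw [ih]
        constructor
        · intro ⟨h1, h2⟩
          refine ⟨by omega, ?_⟩
          have hy : y - (d + r) = (y - (d + (r + 1))) + 1 := by omega
          rw [hy, List.getElem?_cons_succ]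
          exact h2
        · intro ⟨h1, h2⟩
          rcases Nat.lt_or_ge y (d + (r + 1)) with h3 | h3
          · have hy : y - (d + r) = 0 := by omega
            rw [hy] at h2; simp at h2
          · refine ⟨h3, ?_⟩
            have hy : y - (d + r) = (y - (d + (r + 1))) + 1 := by omega
            rw [hy, List.getElem?_cons_succ] at h2
            exact h2
      · rw [normAux_block _ _ _ hv1 hv2]
        rw [rep_append_none]
        constructor
        · intro ⟨h1, h2⟩
          refine ⟨h1, ?_⟩
          rcases Nat.eq_or_lt_of_le h1 with h3 | h3
          · have hy : y - (d + r) = 0 := by omega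
            rw [hy]; rw [← h3] at h2; simpa using h2
          · have hy : y - (d + r) = (y - (d + r) - 1) + 1 := by omega
            rw [hy, List.getElem?_cons_succ]
            rw [hy, List.getElem?_cons_succ] at h2
            rw [ih] at h2
            simpa using h2.2
        · intro ⟨h1, h2⟩
          refine ⟨h1, ?_⟩
          rcases Nat.eq_or_lt_of_le h1 with h3 | h3
          · have hy : y - (d + r) = 0 := by omega
            rw [hy] at h2; rw [← h3]; simpa using h2
          · have hy : y - (d + r) = (y - (d + r) - 1) + 1 := by omega
            rw [hy, List.getElem?_cons_succ] at h2
            rw [hy, List.getElem?_cons_succ, ih]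
            simpa using h2


-- ---------- basic list lemmas ----------
theorem set_self {α : Type} : ∀ (l : List α) (i : Nat) (a : α), l[i]? = some a → l.set i a = l := by
  intro l
  induction l with
  | nil => intro i a h; simp at h
  | cons b t ih =>
    intro i a h
    cases i with
    | zero => simp at h; simp [h]
    | succ j => simp at h; simp [ih j a h]

theorem set_oob {α : Type} : ∀ (l : List α) (i : Nat) (a : α), l.length ≤ i → l.set i a = l := by
  intro l
  induction l with
  | nil => intro i a _; rfl
  | cons b t ih =>
    intro i a h
    cases i with
    | zero => simp at h
    | succ j => simp at h ⊢; exact ih j a h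

theorem map_set' {α β : Type} (f : α → β) :
    ∀ (l : List α) (i : Nat) (a : α), (l.set i a).map f = (l.map f).set i (f a) := by
  intro l
  induction l with
  | nil => intro i a; rfl
  | cons b t ih =>
    intro i a
    cases i with
    | zero => rfl
    | succ j => simp [ih j a]

theorem set_get_self {α : Type} : ∀ (l : List α) (i : Nat) (a : α), i < l.length → (l.set i a)[i]? = some a := by
  intro l
  induction l with
  | nil => intro i a h; simp at h
  | cons b t ih =>
    intro i a h
    cases i with
    | zero => rfl
    | succ j => simp at h ⊢; exact ih j a h

theorem set_get_ne {α : Type} : ∀ (l : List α) (i j : Nat) (a : α), i ≠ j → (l.set i a)[j]? = l[j]? := by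
  intro l
  induction l with
  | nil => intro i j a _; rfl
  | cons b t ih =>
    intro i j a hij
    cases i with
    | zero =>
      cases j with
      | zero => exact absurd rfl hij
      | succ k => rfl
    | succ i' =>
      cases j with
      | zero => rfl
      | succ k => simp only [List.set_cons_succ, List.getElem?_cons_succ]; exact ih i' k a (by omega)

-- ---------- setCell / colD lemmas ----------
theorem setCell_length (g : List (List String)) (y x : Nat) (v : String) :
    (setCell g y x v).length = g.length := by simp [setCell]

theorem setCell_shape (g : List (List String)) (y x : Nat) (v : String) :
    (setCell g y x v).map List.length = g.map List.length := by
  rcases Nat.lt_or_ge y g.length with h | h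
  · rw [setCell, map_set']
    apply set_self
    rw [List.getElem?_map, List.getElem?_eq_getElem h]
    simp [List.getD_eq_getElem?_getD, List.getElem?_eq_getElem h]
  · rw [setCell, set_oob _ _ _ h]

theorem getD_setCell_ne (g : List (List String)) (y y' x : Nat) (v : String) (h : y ≠ y') :
    (setCell g y x v).getD y' [] = g.getD y' [] := by
  rw [List.getD_eq_getElem?_getD, List.getD_eq_getElem?_getD, setCell, set_get_ne _ _ _ _ h]

theorem colD_setCell_self (g : List (List String)) (y x : Nat) (v : String)
    (hx : x < (g.getD y []).length) :
    colD (setCell g y x v) x = (colD g x).set y (some v) := by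
  rw [setCell, colD, map_set', set_get_self _ _ _ hx]
  rfl

theorem colD_setCell_ne (g : List (List String)) (y x x' : Nat) (v : String) (h : x' ≠ x) :
    colD (setCell g y x v) x' = colD g x' := by
  rw [setCell, colD, map_set', set_get_ne _ _ _ _ (fun hc => h hc.symm)]
  rcases Nat.lt_or_ge y g.length with hy | hy
  · apply set_self
    rw [List.getElem?_map, List.getElem?_eq_getElem hy]
    simp [List.getD_eq_getElem?_getD, List.getElem?_eq_getElem hy]
  · apply set_oob
    simpa using hy

theorem cellOf_iff (g : List (List String)) (y x : Nat) (s : Option String) :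
    (colD g x)[y]? = some s ↔ (y < g.length ∧ cellOf g y x = s) := by
  rw [colD, List.getElem?_map]
  rcases Nat.lt_or_ge y g.length with h | h
  · rw [List.getElem?_eq_getElem h]
    simp [cellOf, List.getElem?_eq_getElem h, h]
  · rw [List.getElem?_eq_none (by simpa using h)]
    simp
    omega

theorem cellOf_lt {g : List (List String)} {y x : Nat} {s : String}
    (h : cellOf g y x = some s) : y < g.length ∧ x < (g.getD y []).length := by
  unfold cellOf at h
  rcases hy : g[y]? with _ | row
  · rw [hy] at h; simp at h
  · have hylt : y < g.length := by
      by_contra hc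
      rw [List.getElem?_eq_none (by omega)] at hy
      simp at hy
    refine ⟨hylt, ?_⟩
    rw [hy] at h
    simp at h
    have : x < row.length := by
      by_contra hc
      rw [List.getElem?_eq_none (by omega)] at h
      simp at h
    have hrow : g.getD y [] = row := by
      rw [List.getD_eq_getElem?_getD, hy]
      rfl
    rwa [hrow]

theorem cellOf_colD {g : List (List String)} {y x : Nat} {s : String}
    (h : cellOf g y x = some s) : (colD g x)[y]? = some (some s) := by
  exact (cellOf_iff g y x (some s)).mpr ⟨(cellOf_lt h).1, h⟩

-- ---------- counting / potential ----------
theorem count_set_O_dot : ∀ (l : List String) (i : Nat), l[i]? = some "O" →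
    (l.set i ".").count "O" + 1 = l.count "O" := by
  intro l
  induction l with
  | nil => intro i h; simp at h
  | cons b t ih =>
    intro i h
    cases i with
    | zero =>
      simp at h
      subst h
      simp [List.count_cons]
    | succ j =>
      simp at h
      simp [List.count_cons, ← ih j h]
      omega

theorem count_set_dot_O : ∀ (l : List String) (i : Nat), l[i]? = some "." →
    (l.set i "O").count "O" = l.count "O" + 1 := by
  intro l
  induction l with
  | nil => intro i h; simp at h
  | cons b t ih =>
    intro i h
    cases i with
    | zero =>
      simp at h
      subst h
      simp [List.count_cons]
    | succ j =>
      simp at h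
      simp [List.count_cons, ih j h]
      omega

theorem setCell_cons_succ (r : List String) (rest : List (List String)) (y x : Nat) (v : String) :
    setCell (r :: rest) (y + 1) x v = r :: setCell rest y x v := by
  simp [setCell]

theorem cellOf_cons_succ (r : List String) (rest : List (List String)) (y x : Nat) :
    cellOf (r :: rest) (y + 1) x = cellOf rest y x := by
  simp [cellOf]

theorem pot_move : ∀ (g : List (List String)) (y x : Nat),
    cellOf g y x = some "O" → cellOf g (y + 1) x = some "." →
    potAux (setCell (setCell g (y + 1) x "O") y x ".") + 1 = potAux g := by
  intro g
  induction g with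
  | nil => intro y x h1 _; simp [cellOf] at h1
  | cons r rest ih =>
    intro y x h1 h2
    cases y with
    | zero =>
      rcases rest with _ | ⟨r1, rest'⟩
      · rw [cellOf_cons_succ] at h2; simp [cellOf] at h2
      · rw [cellOf_cons_succ] at h2
        have hr : r[x]? = some "O" := by simpa [cellOf] using h1
        have hr1 : r1[x]? = some "." := by simpa [cellOf] using h2
        rw [setCell_cons_succ]
        have e0 : setCell (r1 :: rest') 0 x "O" = (r1.set x "O") :: rest' := by simp [setCell]
        rw [e0]
        have e1 : setCell (r :: r1.set x "O" :: rest') 0 x "." =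
            (r.set x ".") :: r1.set x "O" :: rest' := by simp [setCell]
        rw [e1]
        have c0 := count_set_O_dot r x hr
        have c1 := count_set_dot_O r1 x hr1
        simp only [potAux, List.length_cons, List.length_set]
        rw [c1, ← c0]
        ring
    | succ y' =>
      rcases rest with _ | ⟨r1, rest'⟩
      · rw [cellOf_cons_succ] at h1; simp [cellOf] at h1
      · rw [cellOf_cons_succ] at h1 h2
        rw [setCell_cons_succ, setCell_cons_succ]
        have hlen : (setCell (setCell (r1 :: rest') (y' + 1) x "O") y' x ".").length =
            (r1 :: rest').length := by rw [setCell_length, setCell_length]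
        have e1 : potAux (r :: setCell (setCell (r1 :: rest') (y' + 1) x "O") y' x ".") =
            (setCell (setCell (r1 :: rest') (y' + 1) x "O") y' x ".").length * r.count "O" +
              potAux (setCell (setCell (r1 :: rest') (y' + 1) x "O") y' x ".") := rfl
        have e2 : potAux (r :: r1 :: rest') =
            (r1 :: rest').length * r.count "O" + potAux (r1 :: rest') := rfl
        have hih := ih y' x h1 h2
        rw [e1, e2, hlen]
        omega

-- ---------- sweep invariant ----------
def InvA (g0 : List (List String)) (st : List (List String) × Bool) : Prop :=
  st.1.map List.length = g0.map List.length ∧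
  (∀ x, normAux (colD st.1 x) 0 0 = normAux (colD g0 x) 0 0) ∧
  potAux st.1 ≤ potAux g0 ∧
  (st.2 = true → potAux st.1 < potAux g0)

theorem sweepStep_inv (g0 : List (List String)) (st : List (List String) × Bool) (y x : Nat)
    (h : InvA g0 st) : InvA g0 (sweepStep st y x) := by
  unfold sweepStep
  split_ifs with hy hg
  · rcases hg with ⟨hO, hdot⟩
    rcases h with ⟨hsh, hcols, hle, hlt⟩
    have hxO := cellOf_lt hO
    have hxd := cellOf_lt hdot
    have hrowy : (setCell st.1 (y + 1) x "O").getD y [] = st.1.getD y [] :=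
      getD_setCell_ne _ _ _ _ _ (by omega)
    constructor
    · exact (setCell_shape _ _ _ _).trans ((setCell_shape _ _ _ _).trans hsh)
    constructor
    · intro x'
      by_cases hx' : x' = x
      · subst hx'
        rw [colD_setCell_self _ _ _ _ (by rw [hrowy]; exact hxO.2),
            colD_setCell_self _ _ _ _ hxd.2]
        rw [normAux_swap _ y 0 0 (cellOf_colD hO) (cellOf_colD hdot)]
        exact hcols _
      · rw [colD_setCell_ne _ _ _ _ _ hx', colD_setCell_ne _ _ _ _ _ hx']
        exact hcols x'
    · have hp := pot_move st.1 y x hO hdot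
      have hstrict : potAux (setCell (setCell st.1 (y + 1) x "O") y x ".") < potAux g0 := by omega
      exact ⟨Nat.le_of_lt hstrict, fun _ => hstrict⟩
  · exact h
  · exact h

theorem sweep_inv (g : List (List String)) : InvA g (sweep g) := by
  unfold sweep
  apply foldl_inv (InvA g)
  · intro s a hs
    exact foldl_inv (InvA g) _ (fun s' a' hs' => sweepStep_inv g s' a a' hs') _ s hs
  · exact ⟨rfl, fun _ => rfl, Nat.le_refl _, by simp⟩

theorem sweepStep_pof (st : List (List String) × Bool) (y x : Nat) :
    sweepStep st y x = st ∨ (sweepStep st y x).2 = true := by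
  unfold sweepStep
  split_ifs
  · right; rfl
  · left; rfl
  · left; rfl

theorem sweep_false {g : List (List String)} (h : (sweep g).2 = false) :
    (sweep g).1 = g ∧ ∀ x, settledCol (colD g x) := by
  have houter : ∀ (st : List (List String) × Bool) (y : Nat),
      (fun st y => (List.range ((g.getD y []).length)).foldl (fun st' x => sweepStep st' y x) st) st y = st ∨
      ((fun st y => (List.range ((g.getD y []).length)).foldl (fun st' x => sweepStep st' y x) st) st y).2 = true := by
    intro st y
    rcases hb : ((List.range ((g.getD y []).length)).foldl (fun st' x => sweepStep st' y x) st).2 with _ | _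
    · left
      simpa using (foldl_pure _ (fun s a => sweepStep_pof s y a) _ st hb).1
    · right; simpa using hb
  have h2 := foldl_pure _ houter (List.range g.length) (g, false) (by unfold sweep at h; exact h)
  have hfix : sweep g = (g, false) := h2.1
  refine ⟨by rw [hfix], ?_⟩
  intro x y0 ⟨hOc, hdc⟩
  have hO : cellOf g y0 x = some "O" := ((cellOf_iff g y0 x _).mp hOc).2
  have hd : cellOf g (y0 + 1) x = some "." := ((cellOf_iff g (y0 + 1) x _).mp hdc).2
  have hy0 := cellOf_lt hO
  have hy1 := cellOf_lt hd
  have hyin : y0 ∈ List.range g.length := List.mem_range.mpr hy0.1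
  have hinner := h2.2 y0 hyin
  have h3 := foldl_pure _ (fun s a => sweepStep_pof s y0 a) (List.range ((g.getD y0 []).length)) (g, false)
      (by rw [hinner])
  have hxin : x ∈ List.range ((g.getD y0 []).length) := List.mem_range.mpr hy0.2
  have hstep := h3.2 x hxin
  unfold sweepStep at hstep
  rw [if_pos (by simp; omega), if_pos ⟨hO, hd⟩] at hstep
  exact absurd (congrArg Prod.snd hstep) (by simp)

-- ---------- the while loop ----------
theorem loopA_norm : ∀ (fuel : Nat) (g : List (List String)), potAux g < fuel →
    (loopA fuel g).map List.length = g.map List.length ∧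
    ∀ x, colD (loopA fuel g) x = normAux (colD g x) 0 0 := by
  intro fuel
  induction fuel with
  | zero => intro g h; omega
  | succ f ih =>
    intro g hf
    rcases hs : sweep g with ⟨g', t⟩
    have hinv := sweep_inv g
    rw [hs] at hinv
    cases t with
    | false =>
      have hfix := @sweep_false g (by rw [hs])
      have hg' : g' = g := by
        have := hfix.1
        rw [hs] at this
        exact this
      have hres : loopA (f + 1) g = g := by simp [loopA, hs, hg']
      rw [hres]
      refine ⟨rfl, fun x => ?_⟩
      rw [normAux_settled (colD g x) 0 0 (hfix.2 x) (by simp)]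
      simp
    | true =>
      have hres : loopA (f + 1) g = loopA f g' := by simp [loopA, hs]
      rw [hres]
      have hpot : potAux g' < f := by
        have h1 : potAux g' < potAux g := hinv.2.2.2 rfl
        omega
      rcases ih g' hpot with ⟨ha, hb⟩
      exact ⟨ha.trans hinv.1, fun x => (hb x).trans (hinv.2.1 x)⟩

-- ---------- B-side lemmas ----------
theorem settle_fold_eq : ∀ (cl : List (Option String)) (out : List (Option String)) (d r : Nat),
    (let s := cl.foldl
      (fun (st : List (Option String) × Nat × Nat) v =>
        if v = some "." then (st.1, st.2.1 + 1, st.2.2)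
        else if v = some "O" then (st.1, st.2.1, st.2.2 + 1)
        else (st.1 ++ List.replicate st.2.1 (some ".") ++ List.replicate st.2.2 (some "O") ++ [v], 0, 0))
      (out, d, r)
     s.1 ++ List.replicate s.2.1 (some ".") ++ List.replicate s.2.2 (some "O")) = out ++ normAux cl d r := by
  intro cl
  induction cl with
  | nil => intro out d r; simp [normAux]
  | cons v rest ih =>
    intro out d r
    by_cases hv1 : v = some "."
    · subst hv1
      rw [normAux_dot]
      simpa using ih out (d + 1) r
    · by_cases hv2 : v = some "O"
      · subst hv2
        rw [normAux_rock]
        simpa [hv1] using ih out d (r + 1)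
      · rw [normAux_block _ _ _ hv1 hv2]
        have := ih (out ++ List.replicate d (some ".") ++ List.replicate r (some "O") ++ [v]) 0 0
        simp only [List.foldl_cons, if_neg hv1, if_neg hv2]
        simp only [this]
        simp

theorem settleColumn_eq_normAux (cl : List (Option String)) : settleColumn cl = normAux cl 0 0 := by
  have := settle_fold_eq cl [] 0 0
  simpa [settleColumn] using this

theorem foldl_max_le : ∀ (l : List (List String)) (b : Nat),
    b ≤ l.foldl (fun w row => Nat.max w row.length) b ∧
    ∀ row ∈ l, row.length ≤ l.foldl (fun w row => Nat.max w row.length) b := by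
  intro l
  induction l with
  | nil => intro b; exact ⟨Nat.le_refl _, by simp⟩
  | cons r t ih =>
    intro b
    rcases ih (Nat.max b r.length) with ⟨h1, h2⟩
    refine ⟨Nat.le_trans (Nat.le_max_left _ _) h1, ?_⟩
    intro row hrow
    rcases List.mem_cons.mp hrow with rfl | hrow
    · exact Nat.le_trans (Nat.le_max_right _ _) h1
    · exact h2 row hrow

theorem row_le_width {g : List (List String)} {row : List String} (h : row ∈ g) :
    row.length ≤ widthOf g := (foldl_max_le g 0).2 row h

theorem shape_range (g : List (List String)) :
    (List.range g.length).map (fun y => ((g.getD y []).length)) = g.map List.length := by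
  apply List.ext_getElem
  · simp
  · intro i h1 h2
    simp only [List.getElem_map, List.getElem_range]
    rw [List.getD_eq_getElem?_getD, List.getElem?_eq_getElem (by simpa using h2)]
    rfl

theorem alt_shape (g : List (List String)) :
    (tilt_south_alt g).map List.length = g.map List.length := by
  unfold tilt_south_alt
  rw [List.map_map]
  have : ((fun y => (List.range ((g.getD y []).length)).map
      (fun x => ((((List.range (widthOf g)).map (fun x => settleColumn (colD g x))).getD x []).getD y none).getD ""))
      : Nat → List String) = fun y => (List.range ((g.getD y []).length)).map _ := rfl
  calc ((List.range g.length).map _) = (List.range g.length).map (fun y => ((g.getD y []).length)) := by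
        apply List.map_congr_left
        intro y _
        simp
    _ = g.map List.length := shape_range g

theorem grid_ext {g1 g2 : List (List String)} (hsh : g1.map List.length = g2.map List.length)
    (hcol : ∀ x, colD g1 x = colD g2 x) : g1 = g2 := by
  have hlen : g1.length = g2.length := by
    have := congrArg List.length hsh
    simpa using this
  apply List.ext_getElem hlen
  intro y h1 h2
  have hrl : (g1[y]).length = (g2[y]).length := by
    have := congrArg (fun l => l[y]?) hsh
    simp only [List.getElem?_map] at this
    rw [List.getElem?_eq_getElem h1, List.getElem?_eq_getElem h2] at this
    simpa using this
  apply List.ext_getElem hrl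
  intro x hx1 hx2
  have := congrArg (fun l => l[y]?) (hcol x)
  simp only [colD, List.getElem?_map] at this
  rw [List.getElem?_eq_getElem h1, List.getElem?_eq_getElem h2] at this
  simp only [Option.map_some] at this
  have hx := Option.some.inj this
  rw [List.getElem?_eq_getElem hx1, List.getElem?_eq_getElem hx2] at hx
  exact Option.some.inj hx

theorem alt_col (g : List (List String)) (x : Nat) :
    colD (tilt_south_alt g) x = normAux (colD g x) 0 0 := by
  have hlenN : (normAux (colD g x) 0 0).length = g.length := by
    rw [normAux_length]; simp [colD]
  have hlenA : (tilt_south_alt g).length = g.length := by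
    have := congrArg List.length (alt_shape g)
    simpa using this
  apply List.ext_getElem?
  intro y
  rcases Nat.lt_or_ge y g.length with hy | hy
  · -- the interesting positions
    have halt : (tilt_south_alt g)[y]? =
        some ((List.range ((g.getD y []).length)).map
          (fun x' => ((((List.range (widthOf g)).map
              (fun x'' => settleColumn (colD g x''))).getD x' []).getD y none).getD "")) := by
      unfold tilt_south_alt
      rw [List.getElem?_map, List.getElem?_range hy]
      rfl
    have hrowD : g.getD y [] = g[y] := by
      rw [List.getD_eq_getElem?_getD, List.getElem?_eq_getElem hy]
      rfl
    have hcolg : (colD g x)[y]? = some (g[y][x]?) := by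
      rw [colD, List.getElem?_map, List.getElem?_eq_getElem hy]
      rfl
    have hvy : y < (normAux (colD g x) 0 0).length := by omega
    have hnone : (normAux (colD g x) 0 0)[y] = none ↔ g[y][x]? = none := by
      have h1 := normAux_none (colD g x) 0 0 y
      rw [List.getElem?_eq_getElem hvy] at h1
      simp only [Nat.add_zero, Nat.sub_zero, Nat.zero_le, true_and, hcolg] at h1
      constructor
      · intro hc
        have := h1.mp (by rw [hc])
        simpa using this
      · intro hc
        have := h1.mpr (by rw [hc])
        simpa using this
    rw [List.getElem?_eq_getElem hvy]
    rw [colD, List.getElem?_map, halt]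
    simp only [Option.map_some, Option.some.injEq]
    rw [List.getElem?_map]
    rcases Nat.lt_or_ge x (g[y]).length with hx | hx
    · -- cell exists: the normalised column has a real string here
      have hxw : x < widthOf g := Nat.lt_of_lt_of_le hx (row_le_width (List.getElem_mem hy))
      have hcell : g[y][x]? = some (g[y][x]) := List.getElem?_eq_getElem hx
      have hvalne : (normAux (colD g x) 0 0)[y] ≠ none := by
        intro hc
        rw [hnone.mp hc] at hcell
        simp at hcell
      rcases hval : (normAux (colD g x) 0 0)[y] with _ | s'
      · exact absurd hval hvalne
      · rw [List.getElem?_range (by rwa [hrowD])]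
        have hcols : ((List.range (widthOf g)).map
            (fun x'' => settleColumn (colD g x'')))[x]? = some (settleColumn (colD g x)) := by
          rw [List.getElem?_map, List.getElem?_range hxw]
          rfl
        simp only [Option.map_some, Option.some.injEq]
        have hgdx : (List.map (fun x'' => settleColumn (colD g x'')) (List.range (widthOf g))).getD x [] =
            settleColumn (colD g x) := by
          rw [List.getD_eq_getElem?_getD, hcols]
          rfl
        rw [List.getD_eq_getElem?_getD, hgdx, settleColumn_eq_normAux,
            List.getElem?_eq_getElem hvy, hval]
        rfl
    · -- missing cell: both sides are none at y
      have hcellnone : g[y][x]? = none := List.getElem?_eq_none hx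
      rw [List.getElem?_eq_none (by simp only [List.length_range]; rwa [hrowD])]
      simp only [Option.map_none]
      exact (hnone.mpr hcellnone).symm
  · rw [List.getElem?_eq_none (by rw [colD, List.length_map, hlenA]; omega),
        List.getElem?_eq_none (by rw [hlenN]; omega)]

theorem tilt_south_spec : Claim_equal_tilt_south := by
  unfold Claim_equal_tilt_south
  intro case _ _
  unfold Spec_tilt_south
  have hA := loopA_norm (potAux case + 1) case (by omega)
  have hAs : tilt_south case = loopA (potAux case + 1) case := rfl
  apply grid_ext
  · rw [hAs]
    exact hA.1.trans (alt_shape case).symm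
  · intro x
    rw [hAs]
    exact (hA.2 x).trans (alt_col case x).symm
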